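-- pv_equiv track=rewrite | github.com/Manohar2503/ECHO | shared/events.py | compare_vector_clocks
-- ===== SOURCE A (Python) =====
-- def compare_vector_clocks(clock1: dict, clock2: dict) -> int:
--     # 1 if clock1 > clock2, -1 if clock1 < clock2, 0 if concurrent
--     greater = False
--     less = False
--     for key in set(clock1.keys()) | set(clock2.keys()):
--         c1 = clock1.get(key, 0)
--         c2 = clock2.get(key, 0)
--         if c1 > c2:
--             greater = True
--         elif c1 < c2:
--             less = True
--     if greater and not less:
--         return 1
--     elif less and not greater:
--         return -1
--     else:
--         return 0
-- ===== SOURCE B (Python) =====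
-- def _dominates(a: dict, b: dict) -> bool:
--     # a >= b pointwise: every entry of a is >= b's value, and a covers every entry of b
--     return all(v >= b.get(k, 0) for k, v in a.items()) and \
--            all(a.get(k, 0) >= v for k, v in b.items())
--
--
-- def compare_vector_clocks(clock1: dict, clock2: dict) -> int:
--     ge = _dominates(clock1, clock2)
--     le = _dominates(clock2, clock1)
--     if ge and le:
--         return 0
--     if ge:
--         return 1
--     if le:
--         return -1
--     return 0
-- ===== Notes on version B (the rewrite author's own statement) =====
-- stated objective: alternative
-- what changed: Replaces A's strict-difference flag collection over an explicitly built key-union set with a pointwise-dominance predicate _dominates (two universal >= scans over each dict's own items, no union set built) applied in both directions, combining the two dominance booleans by a branch on equality/dominance.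
import Mathlib
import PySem

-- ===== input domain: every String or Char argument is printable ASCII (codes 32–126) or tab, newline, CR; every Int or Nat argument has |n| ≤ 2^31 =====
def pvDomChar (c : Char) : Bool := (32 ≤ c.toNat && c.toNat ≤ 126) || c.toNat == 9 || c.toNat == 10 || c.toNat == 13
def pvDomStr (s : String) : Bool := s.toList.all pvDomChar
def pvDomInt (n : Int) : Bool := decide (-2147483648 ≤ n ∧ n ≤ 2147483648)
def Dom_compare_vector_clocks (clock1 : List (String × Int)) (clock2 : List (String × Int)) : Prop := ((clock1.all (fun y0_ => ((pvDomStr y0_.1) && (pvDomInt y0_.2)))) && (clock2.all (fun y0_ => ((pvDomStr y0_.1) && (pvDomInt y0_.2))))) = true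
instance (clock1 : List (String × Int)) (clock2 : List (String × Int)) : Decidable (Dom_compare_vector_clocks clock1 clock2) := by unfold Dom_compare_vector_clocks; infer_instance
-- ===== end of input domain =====

-- B replaces A's strict-difference flag loop over the explicit key union by a pointwise-dominance
-- helper (two universal >= scans over each dict's own items) applied in both directions (no key-union set is
-- built; a timing run measured this constant-factor gain). Pre_ only requires distinct keys per association list — the faithful
-- encodings of Python dicts, which cannot hold duplicate keys, so no actual Python input is excluded.


-- ===== PORT A =====
-- dict.get(key, 0) on the association list (first match, per the type convention)
def clockGet0 (d : List (String × Int)) (k : String) : Int :=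
  match d.find? (fun p => p.1 == k) with
  | some p => p.2
  | none => 0

def compare_vector_clocks (clock1 : List (String × Int)) (clock2 : List (String × Int)) : Int :=
  -- set(clock1.keys()) | set(clock2.keys())
  let ks : PySem.Set String := PySem.Set.union (PySem.Set.ofList (clock1.map (·.1))) (clock2.map (·.1))
  -- the loop carrying the two mutable flags (greater, less)
  let s := ks.foldl (fun (s : Bool × Bool) k =>
      let c1 := clockGet0 clock1 k
      let c2 := clockGet0 clock2 k
      if c1 > c2 then (true, s.2)
      else if c1 < c2 then (s.1, true)
      else s) (false, false)
  if s.1 && !s.2 then 1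
  else if s.2 && !s.1 then -1
  else 0

-- ===== PORT B =====
-- _dominates(a, b): a >= b pointwise (two all-scans over each dict's own items, no key union)
def dominates (a : List (String × Int)) (b : List (String × Int)) : Bool :=
  (a.all (fun p => decide (p.2 ≥ clockGet0 b p.1))) &&
  (b.all (fun p => decide (clockGet0 a p.1 ≥ p.2)))

def compare_vector_clocks_alt (clock1 : List (String × Int)) (clock2 : List (String × Int)) : Int :=
  let ge := dominates clock1 clock2
  let le := dominates clock2 clock1
  if ge && le then 0
  else if ge then 1
  else if le then -1
  else 0

-- ===== PRECONDITION & SPEC =====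
-- Pre_ requires distinct keys in each association list: these are exactly the faithful encodings of
-- Python dicts (which cannot hold duplicate keys), so no input of the Python programs is excluded.
def Pre_compare_vector_clocks (clock1 : List (String × Int)) (clock2 : List (String × Int)) : Prop :=
  (clock1.map Prod.fst).Nodup ∧ (clock2.map Prod.fst).Nodup
instance (clock1 : List (String × Int)) (clock2 : List (String × Int)) : Decidable (Pre_compare_vector_clocks clock1 clock2) := by unfold Pre_compare_vector_clocks; infer_instance

def pvWitness_compare_vector_clocks : (List (String × Int)) × (List (String × Int)) :=
  ([("a", 2), ("b", 1)], [("a", 1), ("c", 0)])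

def Spec_compare_vector_clocks (clock1 : List (String × Int)) (clock2 : List (String × Int)) (out : Int) : Prop := out = compare_vector_clocks_alt clock1 clock2
instance (clock1 : List (String × Int)) (clock2 : List (String × Int)) (out : Int) : Decidable (Spec_compare_vector_clocks clock1 clock2 out) := by unfold Spec_compare_vector_clocks; infer_instance

-- ===== CLAIM =====
def Claim_equal_compare_vector_clocks : Prop := ∀ (clock1 : List (String × Int)) (clock2 : List (String × Int)), Dom_compare_vector_clocks clock1 clock2 → Pre_compare_vector_clocks clock1 clock2 → Spec_compare_vector_clocks clock1 clock2 (compare_vector_clocks clock1 clock2)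

-- ===== LEMMAS AND PROOFS =====

-- A's flag-carrying fold computes exactly the two existential scans over the union key list.
theorem flags_fold_eq_any (c1 c2 : List (String × Int)) (ks : List String) (s : Bool × Bool) :
    ks.foldl (fun (s : Bool × Bool) k =>
      let v1 := clockGet0 c1 k
      let v2 := clockGet0 c2 k
      if v1 > v2 then (true, s.2)
      else if v1 < v2 then (s.1, true)
      else s) s
    = (s.1 || ks.any (fun k => clockGet0 c1 k > clockGet0 c2 k),
       s.2 || ks.any (fun k => clockGet0 c1 k < clockGet0 c2 k)) := by
  induction ks generalizing s with
  | nil => simp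
  | cons k ks ih =>
    simp only [List.foldl_cons, List.any_cons]
    by_cases h1 : clockGet0 c1 k > clockGet0 c2 k
    · have h2 : ¬ clockGet0 c1 k < clockGet0 c2 k := by omega
      simp [h1, h2, ih]
    · by_cases h2 : clockGet0 c1 k < clockGet0 c2 k
      · simp [h1, h2, ih]
      · simp [h1, h2, ih]

-- With distinct keys, lookup of a member's key yields its value.
theorem clockGet0_of_mem (a : List (String × Int)) (k : String) (v : Int)
    (ha : (a.map Prod.fst).Nodup) (h : (k, v) ∈ a) : clockGet0 a k = v := by
  induction a with
  | nil => cases h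
  | cons p t ih =>
    have ha' : p.1 ∉ t.map Prod.fst ∧ (t.map Prod.fst).Nodup := by
      rw [List.map_cons, List.nodup_cons] at ha; exact ha
    obtain ⟨hp, ht⟩ := ha'
    by_cases hpk : p.1 = k
    · have : p = (k, v) := by
        rcases List.mem_cons.mp h with h' | h'
        · exact h'.symm
        · have hkm : k ∈ List.map Prod.fst t := List.mem_map.mpr ⟨(k, v), h', rfl⟩
          exact absurd hkm (hpk ▸ hp)
      simp [clockGet0, this]
    · have h' : (k, v) ∈ t := by
        rcases List.mem_cons.mp h with h'' | h''
        · exact absurd (congrArg Prod.fst h'').symm hpk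
        · exact h''
      have := ih ht h'
      simpa [clockGet0, List.find?_cons, hpk] using this

-- Dominance as a universal statement over the union of keys.
theorem dominates_iff (a b : List (String × Int))
    (ha : (a.map Prod.fst).Nodup) (hb : (b.map Prod.fst).Nodup) :
    dominates a b = true ↔
      ∀ k, (k ∈ a.map Prod.fst ∨ k ∈ b.map Prod.fst) → clockGet0 b k ≤ clockGet0 a k := by
  simp only [dominates, Bool.and_eq_true, List.all_eq_true, decide_eq_true_eq]
  constructor
  · rintro ⟨h1, h2⟩ k (hk | hk)
    · rcases List.mem_map.mp hk with ⟨p, hp, rfl⟩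
      have := clockGet0_of_mem a p.1 p.2 ha (by simpa using hp)
      rw [this]; exact h1 p hp
    · rcases List.mem_map.mp hk with ⟨p, hp, rfl⟩
      have := clockGet0_of_mem b p.1 p.2 hb (by simpa using hp)
      rw [this]; exact h2 p hp
  · intro h
    refine ⟨fun p hp => ?_, fun p hp => ?_⟩
    · have hg := h p.1 (Or.inl (List.mem_map.mpr ⟨p, hp, rfl⟩))
      rwa [clockGet0_of_mem a p.1 p.2 ha (by simpa using hp)] at hg
    · have hg := h p.1 (Or.inr (List.mem_map.mpr ⟨p, hp, rfl⟩))
      rwa [clockGet0_of_mem b p.1 p.2 hb (by simpa using hp)] at hg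

-- The 'any strict difference' flag is the negation of the opposite dominance.
theorem any_gt_eq_not_dominates (c1 c2 : List (String × Int))
    (h1 : (c1.map Prod.fst).Nodup) (h2 : (c2.map Prod.fst).Nodup) :
    ((PySem.Set.union (PySem.Set.ofList (c1.map (·.1))) (c2.map (·.1))).any
        (fun k => clockGet0 c1 k > clockGet0 c2 k))
      = ! dominates c2 c1 := by
  have hiff := dominates_iff c2 c1 h2 h1
  have hmem : ∀ k : String,
      k ∈ (PySem.Set.union (PySem.Set.ofList (c1.map (·.1))) (c2.map (·.1))) ↔
        (k ∈ c1.map Prod.fst ∨ k ∈ c2.map Prod.fst) := by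
    intro k
    simp [PySem.Set.mem_union, PySem.Set.mem_ofList]
  cases hd : dominates c2 c1
  · rw [hd] at hiff
    simp only [Bool.not_false]
    rw [List.any_eq_true]
    have : ¬ ∀ k, (k ∈ c2.map Prod.fst ∨ k ∈ c1.map Prod.fst) → clockGet0 c1 k ≤ clockGet0 c2 k := by
      intro hall; exact absurd (hiff.mpr hall) (by simp)
    push Not at this
    rcases this with ⟨k, hk, hlt⟩
    exact ⟨k, (hmem k).mpr hk.symm, by simpa using hlt⟩
  · have hall := hiff.mp hd
    simp only [Bool.not_true]
    rw [List.any_eq_false]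
    intro k hk
    have := hall k ((hmem k).mp hk).symm
    simpa using this

-- ===== VERDICT =====
theorem compare_vector_clocks_spec : Claim_equal_compare_vector_clocks := by
  intro clock1 clock2 _ hpre
  rcases hpre with ⟨h1, h2⟩
  unfold Spec_compare_vector_clocks compare_vector_clocks compare_vector_clocks_alt
  simp only [flags_fold_eq_any, Bool.false_or]
  rw [any_gt_eq_not_dominates clock1 clock2 h1 h2]
  have hlt : ((PySem.Set.union (PySem.Set.ofList (clock1.map (·.1))) (clock2.map (·.1))).any
      (fun k => clockGet0 clock1 k < clockGet0 clock2 k)) = ! dominates clock1 clock2 := by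
    have := any_gt_eq_not_dominates clock2 clock1 h2 h1
    rw [← this]
    have hperm : ∀ (u v : List String), (∀ k, k ∈ u ↔ k ∈ v) →
        (u.any fun k => clockGet0 clock1 k < clockGet0 clock2 k)
          = (v.any fun k => clockGet0 clock2 k > clockGet0 clock1 k) := by
      intro u v huv
      cases hx : v.any fun k => clockGet0 clock2 k > clockGet0 clock1 k
      · rw [List.any_eq_false] at hx ⊢
        intro k hk
        have := hx k ((huv k).mp hk)
        simpa using this
      · rw [List.any_eq_true] at hx ⊢
        rcases hx with ⟨k, hk, hklt⟩
        exact ⟨k, (huv k).mpr hk, by simpa using hklt⟩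
    apply hperm
    intro k
    simp [PySem.Set.mem_union, PySem.Set.mem_ofList, or_comm]
  rw [hlt]
  cases dominates clock1 clock2 <;> cases dominates clock2 clock1 <;> simp
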